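-- pv_equiv track=rewrite | github.com/cdjasonj/datagrand | pred_result.py | getSentenceLengths
-- ===== SOURCE A (Python) =====
-- def getSentenceLengths(sentences):
--     #返回字典 [len(sentence),idx]
--     sentenceLengths = {}
--     for idx in range(len(sentences)):
--         sentence = sentences[idx]
--         if len(sentence) not in sentenceLengths:
--             sentenceLengths[len(sentence)] = []
--         sentenceLengths[len(sentence)].append(idx)
--
--     return sentenceLengths
-- ===== SOURCE B (Python) =====
-- def getSentenceLengths(sentences):
--     # Two-pass decomposition: compute all lengths once, then build the result
--     # as a dict comprehension over the distinct lengths in first-occurrence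
--     # order, collecting for each length the indices carrying it.
--     lengths = [len(s) for s in sentences]
--     return {L: [i for i, l in enumerate(lengths) if l == L]
--             for L in dict.fromkeys(lengths)}
-- ===== Notes on version B (the rewrite author's own statement) =====
-- stated objective: alternative
-- what changed: Replaces A's single-pass dict bucketing (membership test + append per index) by a two-pass decomposition: compute all lengths once, take the distinct lengths in first-occurrence order via dict.fromkeys, and build the result with a per-length index comprehension.
import Mathlib
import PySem

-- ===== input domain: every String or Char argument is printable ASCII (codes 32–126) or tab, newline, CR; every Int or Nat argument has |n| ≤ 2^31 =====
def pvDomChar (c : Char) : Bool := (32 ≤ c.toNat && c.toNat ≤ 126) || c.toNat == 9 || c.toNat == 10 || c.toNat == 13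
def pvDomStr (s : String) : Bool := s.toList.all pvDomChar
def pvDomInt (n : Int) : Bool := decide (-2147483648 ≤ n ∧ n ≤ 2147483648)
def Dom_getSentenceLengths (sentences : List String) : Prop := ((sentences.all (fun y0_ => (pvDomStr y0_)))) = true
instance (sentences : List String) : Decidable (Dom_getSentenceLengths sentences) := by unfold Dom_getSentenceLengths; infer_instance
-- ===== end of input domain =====

-- B replaces A's single-pass dict-bucketing by a two-pass decomposition (distinct
-- lengths in first-occurrence order, then a per-length index comprehension); objective: alternative.

-- ===== PORT A =====
-- index loop 'for idx in range(len(sentences))' with dict bucketing, step for step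
def getSentenceLengths (sentences : List String) : List (Int × List Int) :=
  ((PySem.List.pyRange 0 (sentences.length : Int) 1).foldl
    (fun (d : PySem.Dict Int (List Int)) idx =>
      let sentence := PySem.List.pyGetD sentences idx ""
      let d' := if d.contains (PySem.Str.len sentence) then d
                else d.insert (PySem.Str.len sentence) ([] : List Int)
      d'.modify (PySem.Str.len sentence) [] (fun xs => xs ++ [idx]))
    PySem.Dict.empty).items

-- ===== PORT B =====
def getSentenceLengths_alt (sentences : List String) : List (Int × List Int) :=
  let lengths := sentences.map (fun s => (PySem.Str.len s : Int))
  (PySem.List.dedup lengths).map (fun L =>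
    (L, ((PySem.List.enumerate lengths).filter (fun p => p.2 == L)).map (·.1)))

-- ===== PRECONDITION & SPEC =====
def Spec_getSentenceLengths (sentences : List String) (out : List (Int × List Int)) : Prop := out = getSentenceLengths_alt sentences
instance (sentences : List String) (out : List (Int × List Int)) : Decidable (Spec_getSentenceLengths sentences out) := by unfold Spec_getSentenceLengths; infer_instance

-- ===== CLAIM (what is proved, stated in full; the proofs are below) =====
def Claim_equal_getSentenceLengths : Prop := ∀ (sentences : List String), Dom_getSentenceLengths sentences → Spec_getSentenceLengths sentences (getSentenceLengths sentences)

-- ===== LEMMAS AND PROOFS =====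

-- the 'if not in: insert []' guard collapses into the subsequent modify
theorem ensure_modify (d : PySem.Dict Int (List Int)) (k : Int) (f : List Int → List Int) :
    ((if d.contains k then d else d.insert k ([] : List Int)).modify k [] f) = d.modify k [] f := by
  by_cases h : d.contains k = true
  · simp [h]
  · simp only [h]
    simp [PySem.Dict.modify, PySem.Dict.insert_insert_self,
      PySem.Dict.getD_insert_self, PySem.Dict.getD_of_not_contains _ _ (by simpa using h)]

-- the index loop over range(len(xs)) is the loop over enumerate(xs)
theorem foldl_range_enum {β : Type} (xs : List String) (g : β → Int → String → β) (init : β) :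
    (PySem.List.pyRange 0 (xs.length : Int) 1).foldl
        (fun d i => g d i (PySem.List.pyGetD xs i "")) init
      = (PySem.List.enumerate xs).foldl (fun d p => g d p.1 p.2) init := by
  induction xs using List.reverseRecOn generalizing init with
  | nil => simp [PySem.List.pyRange_one_eq_nil]
  | append_singleton ys x ih =>
    have hsplit : PySem.List.pyRange 0 ((ys ++ [x]).length : Int) 1
        = PySem.List.pyRange 0 (ys.length : Int) 1 ++ [(ys.length : Int)] := by
      simp only [List.length_append, List.length_cons, List.length_nil]
      push_cast
      exact PySem.List.pyRange_one_succ_right (by positivity)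
    rw [hsplit, List.foldl_append]
    have hcongr : (PySem.List.pyRange 0 (ys.length : Int) 1).foldl
        (fun d i => g d i (PySem.List.pyGetD (ys ++ [x]) i "")) init
        = (PySem.List.pyRange 0 (ys.length : Int) 1).foldl
        (fun d i => g d i (PySem.List.pyGetD ys i "")) init := by
      apply PySem.List.foldl_congr_mem
      intro d i hi
      have hm := (PySem.List.mem_pyRange_one).1 hi
      have h1 : PySem.List.pyGetD (ys ++ [x]) i "" = PySem.List.pyGetD ys i "" := by
        rw [PySem.List.pyGetD_eq_getElem _ _ hm.1 (by simp; omega),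
            PySem.List.pyGetD_eq_getElem _ _ hm.1 (by exact_mod_cast hm.2)]
        rw [List.getElem_append_left]
      rw [h1]
    rw [hcongr, ih]
    have hen : PySem.List.enumerate (ys ++ [x])
        = PySem.List.enumerate ys ++ [((ys.length : Int), x)] := by
      simp [PySem.List.enumerate_append]
    rw [hen, List.foldl_append]
    have hx : PySem.List.pyGetD (ys ++ [x]) (ys.length : Int) ""
        = x := by
      rw [PySem.List.pyGetD_eq_getElem _ _ (by positivity) (by simp)]
      simp
    simp [List.foldl, hx]

-- per-length index list: filtering enumerate(lengths) on the value equals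
-- filtering the (length, index) pairs on the key
theorem filter_enum_map {α : Type} (f : α → Int) (L : Int) (xs : List α) :
    ∀ s : Int,
    ((PySem.List.enumerate (xs.map f) s).filter (fun p => p.2 == L)).map (·.1)
      = ((((PySem.List.enumerate xs s).map (fun p => (f p.2, p.1))).filter
          (fun p => p.1 == L)).map (·.2)) := by
  induction xs with
  | nil => intro s; simp [PySem.List.enumerate_nil]
  | cons x t ih =>
    intro s
    simp only [List.map_cons, PySem.List.enumerate_cons, List.filter_cons, List.map_cons]
    by_cases h : f x == L
    · simp [h, ih (s + 1)]
    · simp [h, ih (s + 1)]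

-- the first components of the (length, index) pairs are just the lengths
theorem map_len_enum (xs : List String) : ∀ s : Int,
    (PySem.List.enumerate xs s).map (fun p => PySem.Str.len p.2) = xs.map PySem.Str.len := by
  induction xs with
  | nil => intro s; simp [PySem.List.enumerate_nil]
  | cons x t ih => intro s; rw [PySem.List.enumerate_cons, List.map_cons, List.map_cons, ih (s + 1)]

theorem getSentenceLengths_spec : Claim_equal_getSentenceLengths := by
  intro sentences _
  unfold Spec_getSentenceLengths getSentenceLengths getSentenceLengths_alt
  simp only []
  -- collapse A's guard+modify into a bare modify
  have hstep : (PySem.List.pyRange 0 (sentences.length : Int) 1).foldl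
      (fun (d : PySem.Dict Int (List Int)) idx =>
        let sentence := PySem.List.pyGetD sentences idx ""
        let d' := if d.contains (PySem.Str.len sentence) then d
                  else d.insert (PySem.Str.len sentence) ([] : List Int)
        d'.modify (PySem.Str.len sentence) [] (fun xs => xs ++ [idx]))
      PySem.Dict.empty
      = (PySem.List.pyRange 0 (sentences.length : Int) 1).foldl
      (fun (d : PySem.Dict Int (List Int)) idx =>
        d.modify (PySem.Str.len (PySem.List.pyGetD sentences idx "")) []
          (fun xs => xs ++ [idx]))
      PySem.Dict.empty := by
    apply PySem.List.foldl_congr_mem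
    intro d i _
    exact ensure_modify d _ _
  rw [hstep,
    foldl_range_enum sentences
      (fun d i s => PySem.Dict.modify d (PySem.Str.len s) [] (fun xs => xs ++ [i]))
      PySem.Dict.empty]
  -- rewrite the enumerate-fold as a fold over (length, index) pairs
  set pairs : List (Int × Int) :=
    (PySem.List.enumerate sentences).map (fun p => ((PySem.Str.len p.2 : Int), p.1)) with hpairs
  have hfold : (PySem.List.enumerate sentences).foldl
      (fun (d : PySem.Dict Int (List Int)) p =>
        d.modify (PySem.Str.len p.2) [] (fun xs => xs ++ [p.1]))
      PySem.Dict.empty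
      = pairs.foldl (fun d p => d.modify p.1 [] (fun xs => xs ++ [p.2])) PySem.Dict.empty := by
    rw [hpairs, List.foldl_map]
  rw [hfold]
  set d := pairs.foldl (fun (d : PySem.Dict Int (List Int)) p =>
    d.modify p.1 [] (fun xs => xs ++ [p.2])) PySem.Dict.empty with hd
  have hnodup : d.keys.Nodup := by
    rw [hd]
    exact PySem.Dict.nodup_keys_foldl_modify_key pairs (·.1) [] (fun _ p xs => xs ++ [p.2]) _
      (by simp [PySem.Dict.keys_empty])
  have hkeys : d.keys = PySem.List.dedup (sentences.map (fun s => (PySem.Str.len s : Int))) := by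
    rw [hd, PySem.Dict.keys_foldl_modify_key]
    simp only [PySem.Dict.keys_empty, PySem.Set.update_nil_left, hpairs, List.map_map]
    rw [PySem.List.dedup_eq_ofList]
    congr 1
    simp only [Function.comp_def]
    simpa using map_len_enum sentences 0
  have hitems := PySem.Dict.items_eq_map_keys d hnodup ([] : List Int)
  rw [hitems, hkeys]
  apply List.map_congr_left
  intro L _
  have hgetD : d.getD L [] = (pairs.filter (fun p => p.1 == L)).map (·.2) := by
    rw [hd, PySem.Dict.getD_foldl_modify_append]
    simp [PySem.Dict.getD_empty]
  rw [hgetD, hpairs]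
  rw [filter_enum_map (fun s => (PySem.Str.len s : Int)) L sentences 0]
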